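-- pv_equiv track=rewrite | github.com/lss05/widgetsTk | p_objetosTk/masked_all_v2_0_7_final.py | __aplicarMasked
-- ===== SOURCE A (Python) =====
-- from string import ascii_letters,digits
--
-- def __aplicarMasked(txt,nwformataux):
--     formato = nwformataux
--     txtaux =""
--     for ch in formato:
--         if ch in ["#","*","&"]:
--             if ch == "#":
--                 achou = False
--                 for i,ct in enumerate(txt):
--                     if ct in "0123456789":
--                         txtaux += ct
--                         txt = txt.replace(ct,"",1)
--                         achou = True
--                         break
--                 if not achou:
--                     break
--             elif ch == "*":
--                 achou = False
--                 for i,ct in enumerate(txt):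
--                     if ct in ascii_letters:
--                         txtaux += ct
--                         txt = txt.replace(ct,"",1)
--                         achou = True
--                         break
--                 if not achou:
--                     break
--             elif ch == "&":
--                 achou = False
--                 for i,ct in enumerate(txt):
--                     if ct in ascii_letters+digits+" -":
--                         txtaux += ct
--                         txt = txt.replace(ct,"",1)
--                         achou = True
--                         break
--                 if not achou:
--                     break
--         else:
--             txtaux += ch
--     return txtaux
-- ===== SOURCE B (Python) =====
-- from string import ascii_letters, digits
--
-- def __aplicarMasked(txt, nwformataux):
--     # Alternative algorithm: per-class index queues built once; each '#'/'*'/'&'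
--     # slot pops the first not-yet-consumed index from its queue instead of
--     # rescanning and rebuilding the remaining text.
--     used = [False] * len(txt)
--     qd = [i for i, c in enumerate(txt) if c in digits]
--     ql = [i for i, c in enumerate(txt) if c in ascii_letters]
--     qa = [i for i, c in enumerate(txt) if c in digits or c in ascii_letters or c in " -"]
--     pd = pl = pa = 0
--     out = []
--     for ch in nwformataux:
--         if ch == "#":
--             while pd < len(qd) and used[qd[pd]]:
--                 pd += 1
--             if pd == len(qd):
--                 break
--             i = qd[pd]
--             pd += 1
--         elif ch == "*":
--             while pl < len(ql) and used[ql[pl]]: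
--                 pl += 1
--             if pl == len(ql):
--                 break
--             i = ql[pl]
--             pl += 1
--         elif ch == "&":
--             while pa < len(qa) and used[qa[pa]]:
--                 pa += 1
--             if pa == len(qa):
--                 break
--             i = qa[pa]
--             pa += 1
--         else:
--             out.append(ch)
--             continue
--         used[i] = True
--         out.append(txt[i])
--     return "".join(out)
-- ===== Notes on version B (the rewrite author's own statement) =====
-- stated objective: alternative
-- what changed: Instead of rescanning (and rebuilding via str.replace) the remaining text for every '#'/'*'/'&' mask slot, B builds one index queue per character class up front and each slot pops the first not-yet-consumed index from its queue, marking it in a used-flags array.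
import Mathlib
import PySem

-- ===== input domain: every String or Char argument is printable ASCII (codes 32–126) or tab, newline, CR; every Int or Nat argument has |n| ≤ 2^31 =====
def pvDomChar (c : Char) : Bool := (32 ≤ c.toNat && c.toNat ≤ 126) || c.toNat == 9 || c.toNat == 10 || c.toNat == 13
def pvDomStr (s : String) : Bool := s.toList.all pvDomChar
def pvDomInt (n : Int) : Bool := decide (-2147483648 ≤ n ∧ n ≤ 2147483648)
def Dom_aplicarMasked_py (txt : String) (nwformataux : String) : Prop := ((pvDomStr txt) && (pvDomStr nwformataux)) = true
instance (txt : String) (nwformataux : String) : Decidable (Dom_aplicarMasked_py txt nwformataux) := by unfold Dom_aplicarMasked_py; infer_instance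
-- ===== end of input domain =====

-- B replaces A's per-mask-slot rescan-and-rebuild of `txt` by index queues built
-- once per character class, popping the first not-yet-consumed index (objective:
-- alternative algorithm, same return value).

-- string.digits / string.ascii_letters / the '&' extra chars
def pvDigits : List Char := "0123456789".toList
def pvLetters : List Char := "abcdefghijklmnopqrstuvwxyzABCDEFGHIJKLMNOPQRSTUVWXYZ".toList
-- A's `ascii_letters + digits + " -"`
def pvAmp : List Char := pvLetters ++ pvDigits ++ [' ', '-']

-- ===== PORT A =====
-- inner `for i,ct in enumerate(txt): if ct in cls: … break` — first char of the class
def findA (cls : List Char) : List Char → Option Char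
  | [] => none
  | c :: rest => if cls.contains c then some c else findA cls rest

-- `txt.replace(ct, "", 1)` — exact for a one-character pattern: drop first occurrence
def removeFirst (ct : Char) : List Char → List Char
  | [] => []
  | c :: rest => if c = ct then rest else c :: removeFirst ct rest

-- the `for ch in formato` loop; `break` returns the accumulated txtaux
def loopA : List Char → List Char → List Char → List Char
  | [], _txt, txtaux => txtaux
  | ch :: rest, txt, txtaux =>
    if ch = '#' then
      match findA pvDigits txt with
      | some ct => loopA rest (removeFirst ct txt) (txtaux ++ [ct])
      | none => txtaux
    else if ch = '*' then
      match findA pvLetters txt with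
      | some ct => loopA rest (removeFirst ct txt) (txtaux ++ [ct])
      | none => txtaux
    else if ch = '&' then
      match findA pvAmp txt with
      | some ct => loopA rest (removeFirst ct txt) (txtaux ++ [ct])
      | none => txtaux
    else loopA rest txt (txtaux ++ [ch])

def aplicarMasked_py (txt : String) (nwformataux : String) : String :=
  String.ofList (loopA nwformataux.toList txt.toList [])

-- ===== PORT B =====
-- `[i for i,c in enumerate(txt) if P c]`
def buildQ (P : Char → Bool) (txt : List Char) : List Nat :=
  ((txt.zipIdx).filter (fun p => P p.1)).map Prod.snd

-- the `while p < len(q) and used[q[p]]: p += 1` skip + pop (pointer = list suffix)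
def popSkip (used : List Bool) : List Nat → Option (Nat × List Nat)
  | [] => none
  | i :: rest => if used.getD i false then popSkip used rest else some (i, rest)

-- the `for ch in nwformataux` loop of B; `break` returns out
def loopB : List Char → List Char → List Nat → List Nat → List Nat → List Bool → List Char → List Char
  | [], _txt0, _qd, _ql, _qa, _used, out => out
  | ch :: rest, txt0, qd, ql, qa, used, out =>
    if ch = '#' then
      match popSkip used qd with
      | none => out
      | some (i, qd') => loopB rest txt0 qd' ql qa (used.set i true) (out ++ [txt0.getD i ' '])
    else if ch = '*' then
      match popSkip used ql with
      | none => out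
      | some (i, ql') => loopB rest txt0 qd ql' qa (used.set i true) (out ++ [txt0.getD i ' '])
    else if ch = '&' then
      match popSkip used qa with
      | none => out
      | some (i, qa') => loopB rest txt0 qd ql qa' (used.set i true) (out ++ [txt0.getD i ' '])
    else loopB rest txt0 qd ql qa used (out ++ [ch])

def aplicarMasked_py_alt (txt : String) (nwformataux : String) : String :=
  let t := txt.toList
  String.ofList (loopB nwformataux.toList t
    (buildQ (fun c => pvDigits.contains c) t)
    (buildQ (fun c => pvLetters.contains c) t)
    (buildQ (fun c => pvDigits.contains c || pvLetters.contains c || ([' ', '-'] : List Char).contains c) t)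
    (List.replicate t.length false) [])

-- ===== PRECONDITION & SPEC =====
def Spec_aplicarMasked_py (txt : String) (nwformataux : String) (out : String) : Prop := out = aplicarMasked_py_alt txt nwformataux
instance (txt : String) (nwformataux : String) (out : String) : Decidable (Spec_aplicarMasked_py txt nwformataux out) := by unfold Spec_aplicarMasked_py; infer_instance

-- ===== CLAIM (what is proved, stated in full; the proofs are below) =====
def Claim_equal_aplicarMasked_py : Prop := ∀ (txt : String) (nwformataux : String), Dom_aplicarMasked_py txt nwformataux → Spec_aplicarMasked_py txt nwformataux (aplicarMasked_py txt nwformataux)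

-- ===== LEMMAS AND PROOFS =====

-- which indices are still unconsumed
def keepF (used : List Bool) (i : Nat) : Bool := !(used.getD i false)

-- A's remaining txt, reconstructed from the original txt and the used flags
def remL (txt0 : List Char) (used : List Bool) : List Char :=
  ((List.range txt0.length).filter (keepF used)).map (fun i => txt0.getD i ' ')

-- queue invariant: sorted, sound (indices in range and of the class), complete
def InvQ (txt0 : List Char) (used : List Bool) (P : Char → Bool) (q : List Nat) : Prop :=
  q.Pairwise (· < ·) ∧
  (∀ i ∈ q, i < txt0.length ∧ P (txt0.getD i ' ') = true) ∧
  (∀ i, i < txt0.length → P (txt0.getD i ' ') = true → keepF used i = true → i ∈ q)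

theorem findA_eq_find? (cls : List Char) (l : List Char) :
    findA cls l = l.find? (fun c => cls.contains c) := by
  induction l with
  | nil => rfl
  | cons c rest ih => simp [findA, List.find?]; split <;> simp_all

theorem popSkip_eq_none (used : List Bool) (q : List Nat) :
    popSkip used q = none ↔ ∀ i ∈ q, used.getD i false = true := by
  induction q with
  | nil => simp [popSkip]
  | cons i rest ih => simp [popSkip]; split <;> simp_all

theorem popSkip_eq_some (used : List Bool) (q : List Nat) (i : Nat) (q' : List Nat)
    (h : popSkip used q = some (i, q')) :
    ∃ s, q = s ++ i :: q' ∧ (∀ j ∈ s, used.getD j false = true) ∧ used.getD i false = false := by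
  induction q generalizing q' with
  | nil => simp [popSkip] at h
  | cons a rest ih =>
    simp only [popSkip] at h
    split at h
    · obtain ⟨s, hs, hall, hi⟩ := ih _ h
      exact ⟨a :: s, by simp [hs], by simp_all, hi⟩
    · simp at h
      exact ⟨[], by simp [h.1, h.2], by simp, by simp_all [h.1]⟩

theorem find?_sorted_min {l : List Nat} (hs : l.Pairwise (· < ·)) {p : Nat → Bool} {i : Nat}
    (hi : i ∈ l) (hpi : p i = true) (hmin : ∀ j ∈ l, p j = true → i ≤ j) :
    l.find? p = some i := by
  induction l with
  | nil => simp at hi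
  | cons a rest ih =>
    by_cases hpa : p a = true
    · rcases List.mem_cons.mp hi with h | h
      · subst h; rw [List.find?_cons_of_pos hpa]
      · have h1 : a < i := (List.pairwise_cons.mp hs).1 i h
        have h2 : i ≤ a := hmin a (by simp) hpa
        omega
    · have hpa' : p a = false := by simpa using hpa
      have hia : i ≠ a := fun h => by rw [← h, hpi] at hpa'; exact Bool.noConfusion hpa'
      rw [List.find?_cons_of_neg hpa]
      exact ih (List.pairwise_cons.mp hs).2 (List.mem_cons.mp hi |>.resolve_left hia)
        (fun j hj hpj => hmin j (List.mem_cons_of_mem _ hj) hpj)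

-- effect of marking index i < len as used on the keep test
theorem keepF_set_lt (used : List Bool) (i : Nat) (hi : i < used.length) (j : Nat) :
    keepF (used.set i true) j = if j = i then false else keepF used j := by
  simp only [keepF, List.getD, List.getElem?_set]
  by_cases h : i = j
  · subst h; simp [hi]
  · have h' : ¬ j = i := fun hh => h hh.symm
    simp [h, h']

theorem pop_lt (txt0 : List Char) (used : List Bool) (P : Char → Bool) (q : List Nat)
    (i : Nat) (q' : List Nat) (h : InvQ txt0 used P q) (hp : popSkip used q = some (i, q')) :
    i < txt0.length := by
  obtain ⟨s, hq, _, _⟩ := popSkip_eq_some used q i q' hp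
  exact (h.2.1 i (by simp [hq])).1

-- marking any in-range index used preserves the invariant for an untouched queue
theorem InvQ_mono (txt0 : List Char) (used : List Bool) (P : Char → Bool) (q : List Nat)
    (i : Nat) (hi : i < used.length) (h : InvQ txt0 used P q) :
    InvQ txt0 (used.set i true) P q := by
  obtain ⟨hs, hsound, hcomp⟩ := h
  refine ⟨hs, hsound, fun j hj hP hk => hcomp j hj hP ?_⟩
  rw [keepF_set_lt used i hi j] at hk
  split at hk
  · exact absurd hk (by simp)
  · exact hk

-- popping preserves the invariant for the popped queue
theorem InvQ_pop (txt0 : List Char) (used : List Bool) (P : Char → Bool) (q : List Nat)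
    (i : Nat) (q' : List Nat) (hi : i < used.length)
    (h : InvQ txt0 used P q) (hp : popSkip used q = some (i, q')) :
    InvQ txt0 (used.set i true) P q' := by
  obtain ⟨hs, hsound, hcomp⟩ := h
  obtain ⟨s, hq, hall, hiu⟩ := popSkip_eq_some used q i q' hp
  subst hq
  refine ⟨((List.pairwise_append.mp hs).2.1).of_cons, fun j hj => hsound j (by simp [hj]), ?_⟩
  intro j hj hP hk
  rw [keepF_set_lt used i hi j] at hk
  split at hk
  · exact absurd hk (by simp)
  · rename_i hji
    have hjq := hcomp j hj hP hk
    rcases List.mem_append.mp hjq with hin | hin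
    · exact absurd (hall j hin) (by simp_all [keepF])
    · rcases List.mem_cons.mp hin with h | h
      · exact absurd h hji
      · exact h

-- the core step: under the invariant, popSkip finds exactly the index of the
-- first remaining character of the class
theorem step_some (txt0 : List Char) (used : List Bool) (P : Char → Bool) (q : List Nat)
    (i : Nat) (q' : List Nat) (h : InvQ txt0 used P q) (hp : popSkip used q = some (i, q')) :
    ((List.range txt0.length).filter (keepF used)).find? (fun j => P (txt0.getD j ' ')) = some i := by
  obtain ⟨hs, hsound, hcomp⟩ := h
  obtain ⟨s, hq, hall, hiu⟩ := popSkip_eq_some used q i q' hp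
  have hiq : i ∈ q := by simp [hq]
  obtain ⟨hin, hPi⟩ := hsound i hiq
  apply find?_sorted_min (List.pairwise_lt_range.filter _)
  · exact List.mem_filter.mpr ⟨List.mem_range.mpr hin, by unfold keepF; rw [hiu]; rfl⟩
  · exact hPi
  · intro j hj hPj
    obtain ⟨hjr, hjk⟩ := List.mem_filter.mp hj
    have hjq := hcomp j (List.mem_range.mp hjr) hPj hjk
    rw [hq] at hjq hs
    rcases List.mem_append.mp hjq with hin | hin
    · exact absurd (hall j hin) (by simp_all [keepF])
    · rcases List.mem_cons.mp hin with h | h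
      · omega
      · have := (List.pairwise_cons.mp (List.pairwise_append.mp hs).2.1).1 j h
        omega

theorem step_none (txt0 : List Char) (used : List Bool) (P : Char → Bool) (q : List Nat)
    (h : InvQ txt0 used P q) (hp : popSkip used q = none) :
    ((List.range txt0.length).filter (keepF used)).find? (fun j => P (txt0.getD j ' ')) = none := by
  obtain ⟨_, _, hcomp⟩ := h
  rw [List.find?_eq_none]
  intro j hj hPj
  obtain ⟨hjr, hjk⟩ := List.mem_filter.mp hj
  have := (popSkip_eq_none used q).mp hp j (hcomp j (List.mem_range.mp hjr) hPj hjk)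
  simp_all [keepF]

theorem removeFirst_append {c : Char} {l1 l2 : List Char} (h : c ∉ l1) :
    removeFirst c (l1 ++ c :: l2) = l1 ++ l2 := by
  induction l1 with
  | nil => simp [removeFirst]
  | cons a rest ih =>
    have : a ≠ c := fun he => h (by simp [he])
    simp_all [removeFirst]

-- A's find-and-remove on the remaining txt = B's pop + mark used
theorem rem_step (txt0 : List Char) (used : List Bool) (i : Nat) {Pc : Char → Bool}
    (hlen : used.length = txt0.length)
    (hfind : ((List.range txt0.length).filter (keepF used)).find?
        (fun j => Pc (txt0.getD j ' ')) = some i) :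
    ((List.range txt0.length).filter (keepF (used.set i true))).map (fun j => txt0.getD j ' ')
      = removeFirst (txt0.getD i ' ')
          (((List.range txt0.length).filter (keepF used)).map (fun j => txt0.getD j ' ')) := by
  obtain ⟨hPi, r1, r2, hr, hr1⟩ := List.find?_eq_some_iff_append.mp hfind
  have hin : i < txt0.length := by
    have : i ∈ (List.range txt0.length).filter (keepF used) := by simp [hr]
    exact List.mem_range.mp (List.mem_filter.mp this).1
  have hnd : ((List.range txt0.length).filter (keepF used)).Nodup :=
    List.nodup_range.filter _
  rw [hr] at hnd
  have hi1 : i ∉ r1 := by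
    intro h; exact (List.disjoint_of_nodup_append hnd h) (by simp)
  have hi2 : i ∉ r2 := by
    have := (List.nodup_append.mp hnd).2.1
    simp at this; exact this.1
  have hset : (List.range txt0.length).filter (keepF (used.set i true))
      = ((List.range txt0.length).filter (keepF used)).filter (fun j => decide (j ≠ i)) := by
    rw [List.filter_filter]
    apply List.filter_congr
    intro j _
    rw [keepF_set_lt used i (by omega) j]
    by_cases hij : j = i
    · simp [hij]
    · simp [hij]
  rw [hset, hr]
  have hf1 : r1.filter (fun j => decide (j ≠ i)) = r1 :=
    List.filter_eq_self.mpr (fun a ha => by simp; exact fun h => hi1 (h ▸ ha))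
  have hf2 : r2.filter (fun j => decide (j ≠ i)) = r2 :=
    List.filter_eq_self.mpr (fun a ha => by simp; exact fun h => hi2 (h ▸ ha))
  rw [List.filter_append, List.filter_cons]
  simp only [decide_eq_true_eq]
  rw [if_neg (by simp), hf1, hf2, List.map_append, List.map_append, List.map_cons]
  rw [removeFirst_append]
  intro hmem
  obtain ⟨j, hj, hje⟩ := List.mem_map.mp hmem
  have hnp := hr1 j hj
  rw [hje] at hnp
  simp only [Bool.not_eq_true'] at hnp
  rw [hPi] at hnp
  exact Bool.noConfusion hnp

-- initial queues: buildQ satisfies the invariant w.r.t. the all-false used array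
theorem buildQ_sound (P : Char → Bool) (txt0 : List Char) :
    ∀ i ∈ buildQ P txt0, i < txt0.length ∧ P (txt0.getD i ' ') = true := by
  intro i hi
  obtain ⟨⟨c, j⟩, hmem, hj⟩ := List.mem_map.mp hi
  obtain ⟨hz, hpred⟩ := List.mem_filter.mp hmem
  obtain ⟨_, hlt, hc⟩ := List.mem_zipIdx hz
  cases hj
  simp only [Nat.zero_add, Nat.sub_zero] at hlt hc
  refine ⟨hlt, ?_⟩
  have hgd : txt0.getD j ' ' = c := by
    rw [List.getD, List.getElem?_eq_getElem hlt]
    simp [hc]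
  rw [hgd]
  simpa using hpred

theorem buildQ_complete (P : Char → Bool) (txt0 : List Char) :
    ∀ i, i < txt0.length → P (txt0.getD i ' ') = true → i ∈ buildQ P txt0 := by
  intro i hi hP
  apply List.mem_map.mpr
  refine ⟨(txt0[i], i), List.mem_filter.mpr ⟨?_, ?_⟩, rfl⟩
  · exact List.mem_zipIdx_iff_getElem?.mpr (by simp [List.getElem?_eq_getElem hi])
  · simpa [List.getD, List.getElem?_eq_getElem hi] using hP

theorem buildQ_sorted (P : Char → Bool) : ∀ (txt0 : List Char) (k : Nat),
    (((txt0.zipIdx k).filter (fun p => P p.1)).map Prod.snd).Pairwise (· < ·) := by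
  intro txt0
  induction txt0 with
  | nil => intro k; simp
  | cons c rest ih =>
    intro k
    simp only [List.zipIdx_cons, List.filter_cons]
    split
    · simp only [List.map_cons]
      refine List.Pairwise.cons ?_ (ih (k + 1))
      intro j hj
      obtain ⟨p, hpmem, hpj⟩ := List.mem_map.mp hj
      have := (List.mem_zipIdx (List.mem_filter.mp hpmem).1).1
      omega
    · exact ih (k + 1)

theorem InvQ_init (P : Char → Bool) (txt0 : List Char) :
    InvQ txt0 (List.replicate txt0.length false) P (buildQ P txt0) :=
  ⟨buildQ_sorted P txt0 0, buildQ_sound P txt0,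
   fun i hi hP _ => buildQ_complete P txt0 i hi hP⟩

-- B's '&' membership test agrees with A's concatenated string
theorem amp_eq (c : Char) :
    (pvDigits.contains c || pvLetters.contains c || ([' ', '-'] : List Char).contains c)
      = pvAmp.contains c := by
  simp only [pvAmp, List.contains_eq_mem, List.mem_append, Bool.decide_or]
  cases hd : decide (c ∈ pvDigits) <;> cases hl : decide (c ∈ pvLetters) <;>
    cases hm : decide (c ∈ ([' ', '-'] : List Char)) <;> simp_all

-- main loop correspondence
theorem loop_eq (fmt : List Char) : ∀ (txt0 : List Char) (used : List Bool)
    (qd ql qa : List Nat) (out : List Char),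
    used.length = txt0.length →
    InvQ txt0 used (fun c => pvDigits.contains c) qd →
    InvQ txt0 used (fun c => pvLetters.contains c) ql →
    InvQ txt0 used (fun c => pvAmp.contains c) qa →
    loopA fmt (remL txt0 used) out = loopB fmt txt0 qd ql qa used out := by
  induction fmt with
  | nil => intro txt0 used qd ql qa out _ _ _ _; rfl
  | cons ch rest ih =>
    intro txt0 used qd ql qa out hlen hd hl ha
    have hfind : ∀ (cls : List Char),
        findA cls (remL txt0 used)
          = (((List.range txt0.length).filter (keepF used)).find?
              (fun j => cls.contains (txt0.getD j ' '))).map (fun j => txt0.getD j ' ') := by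
      intro cls
      rw [findA_eq_find?, remL, List.find?_map]
      rfl
    have key : ∀ (cls : List Char) (q : List Nat),
        InvQ txt0 used (fun c => cls.contains c) q →
        ∀ (contA : Char → List Char) (contB : Nat → List Nat → List Char),
        (∀ i q', popSkip used q = some (i, q') →
           contA (txt0.getD i ' ') = contB i q') →
        (match findA cls (remL txt0 used) with
          | some ct => contA ct
          | none => out)
        = (match popSkip used q with
          | none => out
          | some (i, q') => contB i q') := by
      intro cls q hq contA contB hcont
      rcases hps : popSkip used q with _ | ⟨i, q'⟩
      · rw [hfind, step_none txt0 used _ q hq hps]; rfl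
      · rw [hfind, step_some txt0 used _ q i q' hq hps]
        exact hcont i q' hps
    by_cases h1 : ch = '#'
    · subst h1
      simp only [loopA, loopB, reduceIte]
      exact key pvDigits qd hd
        (fun ct => loopA rest (removeFirst ct (remL txt0 used)) (out ++ [ct]))
        (fun i q' => loopB rest txt0 q' ql qa (used.set i true) (out ++ [txt0.getD i ' ']))
        (fun i q' hps => by
          have hstep := rem_step txt0 used i hlen (step_some txt0 used _ qd i q' hd hps)
          have hi : i < used.length := hlen ▸ pop_lt txt0 used _ qd i q' hd hps
          simp only [remL]
          rw [← hstep]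
          exact ih txt0 (used.set i true) q' ql qa (out ++ [txt0.getD i ' '])
            (by simp [hlen]) (InvQ_pop _ _ _ _ _ _ hi hd hps) (InvQ_mono _ _ _ _ _ hi hl)
            (InvQ_mono _ _ _ _ _ hi ha))
    · by_cases h2 : ch = '*'
      · subst h2
        simp only [loopA, loopB, reduceIte]
        exact key pvLetters ql hl
          (fun ct => loopA rest (removeFirst ct (remL txt0 used)) (out ++ [ct]))
          (fun i q' => loopB rest txt0 qd q' qa (used.set i true) (out ++ [txt0.getD i ' ']))
          (fun i q' hps => by
            have hstep := rem_step txt0 used i hlen (step_some txt0 used _ ql i q' hl hps)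
            have hi : i < used.length := hlen ▸ pop_lt txt0 used _ ql i q' hl hps
            simp only [remL]
            rw [← hstep]
            exact ih txt0 (used.set i true) qd q' qa (out ++ [txt0.getD i ' '])
              (by simp [hlen]) (InvQ_mono _ _ _ _ _ hi hd) (InvQ_pop _ _ _ _ _ _ hi hl hps)
              (InvQ_mono _ _ _ _ _ hi ha))
      · by_cases h3 : ch = '&'
        · subst h3
          simp only [loopA, loopB, reduceIte]
          exact key pvAmp qa ha
            (fun ct => loopA rest (removeFirst ct (remL txt0 used)) (out ++ [ct]))
            (fun i q' => loopB rest txt0 qd ql q' (used.set i true) (out ++ [txt0.getD i ' ']))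
            (fun i q' hps => by
              have hstep := rem_step txt0 used i hlen (step_some txt0 used _ qa i q' ha hps)
              have hi : i < used.length := hlen ▸ pop_lt txt0 used _ qa i q' ha hps
              simp only [remL]
              rw [← hstep]
              exact ih txt0 (used.set i true) qd ql q' (out ++ [txt0.getD i ' '])
                (by simp [hlen]) (InvQ_mono _ _ _ _ _ hi hd) (InvQ_mono _ _ _ _ _ hi hl)
                (InvQ_pop _ _ _ _ _ _ hi ha hps))
        · simp only [loopA, loopB, if_neg h1, if_neg h2, if_neg h3]
          exact ih txt0 used qd ql qa (out ++ [ch]) hlen hd hl ha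

theorem remL_init (txt0 : List Char) :
    remL txt0 (List.replicate txt0.length false) = txt0 := by
  rw [remL]
  rw [List.filter_eq_self.mpr (fun a ha => by
    simp [keepF, List.getD, List.mem_range.mp ha])]
  apply List.ext_getElem (by simp)
  intro i h1 h2
  simp [List.getD, List.getElem?_eq_getElem h2]

-- ===== VERDICT (by name: the statement is the Claim_ definition above) =====
theorem aplicarMasked_py_spec : Claim_equal_aplicarMasked_py := by
  intro txt nwformataux _
  unfold Spec_aplicarMasked_py aplicarMasked_py aplicarMasked_py_alt
  have hb : buildQ (fun c => pvDigits.contains c || pvLetters.contains c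
        || ([' ', '-'] : List Char).contains c) txt.toList
      = buildQ (fun c => pvAmp.contains c) txt.toList := by
    unfold buildQ
    congr 1
    exact List.filter_congr (fun p _ => amp_eq p.1)
  simp only [hb]
  rw [← loop_eq nwformataux.toList txt.toList (List.replicate txt.toList.length false)
      _ _ _ [] (by simp) (InvQ_init _ _) (InvQ_init _ _) (InvQ_init _ _), remL_init]
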